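-- pv_equiv track=rewrite | github.com/nickovic/rtamt | rtamt/explanation/ltl/discrete_time/explanations.py | explain_sat_or
-- ===== SOURCE A (Python) =====
-- def explain_sat_or(op1_signal, op2_signal, intervals):
--     op1_intervals = []
--     op2_intervals = []
--     for begin, end in intervals:
--         op1_state = False
--         op2_state = False
--         for i in range(begin, end+1):
--             if not op1_state and op1_signal[i] >= 0:
--                     op1_state = True
--                     op1_start = i
--             elif op1_state and op1_signal[i] < 0:
--                     op1_state = False
--                     op1_intervals.append([op1_start, i - 1])
--
--             if not op2_state and op2_signal[i] >= 0:
--                     op2_state = True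
--                     op2_start = i
--             elif op2_state and op2_signal[i] < 0:
--                     op2_state = False
--                     op2_intervals.append([op2_start, i - 1])
--         if op1_state:
--             op1_intervals.append([op1_start, i])
--         if op2_state:
--             op2_intervals.append([op2_start, i])
--
--     return op1_intervals, op2_intervals
-- ===== SOURCE B (Python) =====
-- def explain_sat_or(op1_signal, op2_signal, intervals):
--     def runs(sig, begin, end):
--         idx = range(begin, end + 1)
--         starts = [i for i in idx if sig[i] >= 0 and (i == begin or sig[i - 1] < 0)]
--         ends = [i for i in idx if sig[i] >= 0 and (i == end or sig[i + 1] < 0)]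
--         return [[s, t] for s, t in zip(starts, ends)]
--
--     op1_intervals = []
--     op2_intervals = []
--     for begin, end in intervals:
--         op1_intervals += runs(op1_signal, begin, end)
--         op2_intervals += runs(op2_signal, begin, end)
--     return op1_intervals, op2_intervals
-- ===== Notes on version B (the rewrite author's own statement) =====
-- stated objective: alternative
-- what changed: A's interleaved two-flag state machine with remembered start markers and a post-loop tail flush is replaced by stateless boundary detection: per interval, two independent filtered passes collect run starts (non-negative with negative/absent left neighbour) and run ends (non-negative with negative/absent right neighbour), and zip pairs them into [start, end] runs.
import Mathlib
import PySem

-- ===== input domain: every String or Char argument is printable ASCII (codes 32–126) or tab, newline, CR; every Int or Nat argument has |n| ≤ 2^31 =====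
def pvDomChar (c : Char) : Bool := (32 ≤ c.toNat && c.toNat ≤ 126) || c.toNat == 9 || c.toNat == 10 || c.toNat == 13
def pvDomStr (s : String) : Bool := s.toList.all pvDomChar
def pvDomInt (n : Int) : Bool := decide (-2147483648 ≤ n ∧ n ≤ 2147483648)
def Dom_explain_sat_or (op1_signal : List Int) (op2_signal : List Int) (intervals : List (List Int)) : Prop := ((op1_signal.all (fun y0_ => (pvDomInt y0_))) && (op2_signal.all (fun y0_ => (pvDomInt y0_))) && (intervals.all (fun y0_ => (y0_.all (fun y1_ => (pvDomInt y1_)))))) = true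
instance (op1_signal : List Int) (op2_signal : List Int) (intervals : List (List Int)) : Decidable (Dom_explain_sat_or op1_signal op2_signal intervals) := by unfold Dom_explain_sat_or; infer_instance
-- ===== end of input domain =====

-- B replaces A's interleaved two-flag state machine (with post-loop tail flush) by stateless
-- boundary detection per interval: filter run-start indices, filter run-end indices, zip them;
-- objective: alternative algorithm, same cost.


-- ===== PORT A =====
-- loop body of A's inner loop, for ONE signal: state = (op_state, op_start, op_intervals)
def pvStepA (sig : List Int) (s : Bool × Int × List (List Int)) (i : Int) : Bool × Int × List (List Int) :=
  if ¬ s.1 ∧ 0 ≤ PySem.List.pyGetD sig i 0 then (true, i, s.2.2)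
  else if s.1 ∧ PySem.List.pyGetD sig i 0 < 0 then (false, s.2.1, s.2.2 ++ [[s.2.1, i - 1]])
  else s

-- literal port of A: per interval one interleaved pass over range(begin, end+1) with both
-- state machines, then the tail flush with i = the last loop index (Python reads `i` there
-- only when a state flag is set, hence only when the range is nonempty; sig[i] is pyGetD,
-- exact under Pre_)
def explain_sat_or (op1_signal : List Int) (op2_signal : List Int) (intervals : List (List Int)) : List (List Int) × List (List Int) :=
  intervals.foldl (fun (acc : List (List Int) × List (List Int)) iv =>
    match iv with
    | [b, e] =>
      let R := PySem.List.pyRange b (e + 1) 1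
      let fin := R.foldl (fun (s : (Bool × Int × List (List Int)) × (Bool × Int × List (List Int))) i =>
          (pvStepA op1_signal s.1 i, pvStepA op2_signal s.2 i))
        ((false, 0, acc.1), (false, 0, acc.2))
      let il := R.getLastD 0
      (if fin.1.1 then fin.1.2.2 ++ [[fin.1.2.1, il]] else fin.1.2.2,
       if fin.2.1 then fin.2.2.2 ++ [[fin.2.2.1, il]] else fin.2.2.2)
    | _ => acc) ([], [])

-- ===== PORT B =====
-- sig[i] >= 0 (pyGetD: Python indexing with negative wraparound; exact in range, under Pre_)
def pvP (sig : List Int) (j : Int) : Bool := decide (0 ≤ PySem.List.pyGetD sig j 0)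

-- B's `starts`: indices with a non-negative sample whose left neighbour is absent or negative
def pvStartsF (sig : List Int) (b : Int) (l : List Int) : List Int :=
  l.filter (fun i => pvP sig i && (decide (i = b) || !pvP sig (i - 1)))

-- B's `ends`: indices with a non-negative sample whose right neighbour is absent or negative
def pvEndsF (sig : List Int) (e : Int) (l : List Int) : List Int :=
  l.filter (fun i => pvP sig i && (decide (i = e) || !pvP sig (i + 1)))

-- B's `runs`: zip the start boundaries with the end boundaries
def pvRunsB (sig : List Int) (b e : Int) : List (List Int) :=
  let idx := PySem.List.pyRange b (e + 1) 1
  List.zipWith (fun s t => [s, t]) (pvStartsF sig b idx) (pvEndsF sig e idx)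

-- `begin, end = iv` (B only looks at two-element intervals; others are outside Pre_)
def pvPair? (iv : List Int) : Option (Int × Int) :=
  if iv.length = 2 then some (iv.getD 0 0, iv.getD 1 0) else none

def explain_sat_or_alt (op1_signal : List Int) (op2_signal : List Int) (intervals : List (List Int)) : List (List Int) × List (List Int) :=
  intervals.foldl (fun (acc : List (List Int) × List (List Int)) iv =>
    match pvPair? iv with
    | some (b, e) =>
      (acc.1 ++ pvRunsB op1_signal b e,
       acc.2 ++ pvRunsB op2_signal b e)
    | none => acc) ([], [])

-- ===== PRECONDITION & SPEC =====
-- Pre_ excludes exactly the inputs on which Python A raises: an interval that is not a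
-- two-element [begin, end] list (unpacking ValueError), or a nonempty index range b..e
-- reaching outside [-len, len) of either signal (IndexError). Negative in-range indices
-- wrap from the end in both A and B (both index the same way) and stay inside Pre_.
def Pre_explain_sat_or (op1_signal : List Int) (op2_signal : List Int) (intervals : List (List Int)) : Prop :=
  ∀ iv ∈ intervals, iv.length = 2 ∧
    (iv.getD 0 0 ≤ iv.getD 1 0 →
      -(op1_signal.length : Int) ≤ iv.getD 0 0 ∧ iv.getD 1 0 < (op1_signal.length : Int) ∧
      -(op2_signal.length : Int) ≤ iv.getD 0 0 ∧ iv.getD 1 0 < (op2_signal.length : Int))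
instance (op1_signal : List Int) (op2_signal : List Int) (intervals : List (List Int)) : Decidable (Pre_explain_sat_or op1_signal op2_signal intervals) := by unfold Pre_explain_sat_or; infer_instance

def pvWitness_explain_sat_or : List Int × List Int × List (List Int) := ([1, -1, 2], [-3, 4, 5], [[0, 2], [-2, 1]])

def Spec_explain_sat_or (op1_signal : List Int) (op2_signal : List Int) (intervals : List (List Int)) (out : List (List Int) × List (List Int)) : Prop := out = explain_sat_or_alt op1_signal op2_signal intervals
instance (op1_signal : List Int) (op2_signal : List Int) (intervals : List (List Int)) (out : List (List Int) × List (List Int)) : Decidable (Spec_explain_sat_or op1_signal op2_signal intervals out) := by unfold Spec_explain_sat_or; infer_instance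

-- ===== CLAIM (what is proved, stated in full; the proofs are below) =====
def Claim_equal_explain_sat_or : Prop := ∀ (op1_signal : List Int) (op2_signal : List Int) (intervals : List (List Int)), Dom_explain_sat_or op1_signal op2_signal intervals → Pre_explain_sat_or op1_signal op2_signal intervals → Spec_explain_sat_or op1_signal op2_signal intervals (explain_sat_or op1_signal op2_signal intervals)

-- ===== LEMMAS AND PROOFS =====

-- A's single-signal machine over an index list, and the tail flush
def pvFold (sig : List Int) (idxs : List Int) (s : Bool × Int × List (List Int)) : Bool × Int × List (List Int) :=
  idxs.foldl (pvStepA sig) s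

def pvFlush (e : Int) (s : Bool × Int × List (List Int)) : List (List Int) :=
  if s.1 then s.2.2 ++ [[s.2.1, e]] else s.2.2

lemma pvStepA_false_pos (sig : List Int) (st0 i : Int) (acc : List (List Int)) (hp : pvP sig i = true) :
    pvStepA sig (false, st0, acc) i = (true, i, acc) := by
  simp [pvP] at hp; simp [pvStepA, hp]

lemma pvStepA_false_neg (sig : List Int) (st0 i : Int) (acc : List (List Int)) (hp : pvP sig i = false) :
    pvStepA sig (false, st0, acc) i = (false, st0, acc) := by
  simp [pvP] at hp; simp [pvStepA, hp, not_le.mpr hp]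

lemma pvStepA_true_pos (sig : List Int) (s i : Int) (acc : List (List Int)) (hp : pvP sig i = true) :
    pvStepA sig (true, s, acc) i = (true, s, acc) := by
  simp [pvP] at hp; simp [pvStepA, not_lt.mpr hp]

lemma pvStepA_true_neg (sig : List Int) (s i : Int) (acc : List (List Int)) (hp : pvP sig i = false) :
    pvStepA sig (true, s, acc) i = (false, s, acc ++ [[s, i - 1]]) := by
  simp [pvP] at hp; simp [pvStepA, hp]

-- the main induction: A's machine over range a..e equals B's boundary zip, with the
-- left-neighbour context carried as the state (fresh ↔ flag down, open run ↔ flag up)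
lemma pvFT (sig : List Int) (b e : Int) (n : ℕ) : ∀ a : Int, b ≤ a → ((e + 1) - a).toNat = n →
    (((a = b ∨ pvP sig (a - 1) = false) →
      ∀ st0 acc, pvFlush e (pvFold sig (PySem.List.pyRange a (e + 1) 1) (false, st0, acc))
        = acc ++ List.zipWith (fun s t => [s, t])
            (pvStartsF sig b (PySem.List.pyRange a (e + 1) 1))
            (pvEndsF sig e (PySem.List.pyRange a (e + 1) 1)))
    ∧ (b < a → a ≤ e + 1 → pvP sig (a - 1) = true →
      ∀ s acc, pvFlush e (pvFold sig (PySem.List.pyRange a (e + 1) 1) (true, s, acc))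
        = acc ++ List.zipWith (fun s' t => [s', t])
            (s :: pvStartsF sig b (PySem.List.pyRange a (e + 1) 1))
            (pvEndsF sig e (PySem.List.pyRange (a - 1) (e + 1) 1)))) := by
  induction n with
  | zero =>
    intro a hba hn
    have hea : e + 1 ≤ a := by omega
    constructor
    · intro _ st0 acc
      rw [PySem.List.pyRange_one_eq_nil hea]
      simp [pvFold, pvFlush, pvStartsF, pvEndsF]
    · intro _ hae hp1 s acc
      have ha : a = e + 1 := by omega
      subst ha
      rw [PySem.List.pyRange_one_eq_nil le_rfl]
      have hr : PySem.List.pyRange (e + 1 - 1) (e + 1) 1 = [e] := by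
        rw [show e + 1 - 1 = e from by ring, PySem.List.pyRange_one_cons (by omega),
          PySem.List.pyRange_one_eq_nil le_rfl]
      rw [hr]
      have hpe : pvP sig e = true := by rw [show e = e + 1 - 1 from by ring]; exact hp1
      simp [pvFold, pvFlush, pvStartsF, pvEndsF, hpe]
  | succ n ih =>
    intro a hba hn
    have hae : a ≤ e := by omega
    have hcons : PySem.List.pyRange a (e + 1) 1 = a :: PySem.List.pyRange (a + 1) (e + 1) 1 :=
      PySem.List.pyRange_one_cons (by omega)
    obtain ⟨ihF, ihT⟩ := ih (a + 1) (by omega) (by omega)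
    rw [show a + 1 - 1 = a from by ring] at ihF ihT
    constructor
    · intro hfresh st0 acc
      have hS : (decide (a = b) || !pvP sig (a - 1)) = true := by
        rcases hfresh with h | h
        · simp [h]
        · simp [h]
      by_cases hpa : pvP sig a = true
      · rw [hcons]
        rw [show pvFold sig (a :: PySem.List.pyRange (a + 1) (e + 1) 1) (false, st0, acc)
            = pvFold sig (PySem.List.pyRange (a + 1) (e + 1) 1) (true, a, acc) from by
          simp [pvFold, pvStepA_false_pos _ _ _ _ hpa]]
        rw [ihT (by omega) (by omega) hpa a acc]
        rw [hcons]
        simp [pvStartsF, hpa, hS]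
      · have hpa' : pvP sig a = false := by simpa using hpa
        rw [hcons]
        rw [show pvFold sig (a :: PySem.List.pyRange (a + 1) (e + 1) 1) (false, st0, acc)
            = pvFold sig (PySem.List.pyRange (a + 1) (e + 1) 1) (false, st0, acc) from by
          simp [pvFold, pvStepA_false_neg _ _ _ _ hpa']]
        rw [ihF (Or.inr hpa') st0 acc]
        simp [pvStartsF, pvEndsF, hpa']
    · intro hb _ hp1 s acc
      have hr1 : PySem.List.pyRange (a - 1) (e + 1) 1 = (a - 1) :: PySem.List.pyRange a (e + 1) 1 := by
        rw [PySem.List.pyRange_one_cons (by omega), show a - 1 + 1 = a from by ring]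
      have hne : decide (a - 1 = e) = false := by simp; omega
      have hnb : decide (a = b) = false := by simp; omega
      by_cases hpa : pvP sig a = true
      · rw [hcons]
        rw [show pvFold sig (a :: PySem.List.pyRange (a + 1) (e + 1) 1) (true, s, acc)
            = pvFold sig (PySem.List.pyRange (a + 1) (e + 1) 1) (true, s, acc) from by
          simp [pvFold, pvStepA_true_pos _ _ _ _ hpa]]
        rw [ihT (by omega) (by omega) hpa s acc]
        rw [hr1, hcons]
        -- predE (a-1) = !pvP a = false drops a-1; predS a = false drops a
        simp [pvStartsF, pvEndsF, hp1, hpa, hne, hnb, show a - 1 + 1 = a from by ring]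
      · have hpa' : pvP sig a = false := by simpa using hpa
        rw [hcons]
        rw [show pvFold sig (a :: PySem.List.pyRange (a + 1) (e + 1) 1) (true, s, acc)
            = pvFold sig (PySem.List.pyRange (a + 1) (e + 1) 1) (false, s, acc ++ [[s, a - 1]]) from by
          simp [pvFold, pvStepA_true_neg _ _ _ _ hpa']]
        rw [ihF (Or.inr hpa') s (acc ++ [[s, a - 1]])]
        rw [hr1, hcons]
        -- predE (a-1) = !pvP a = true keeps a-1; predS a and predE a are false and drop a
        simp [pvStartsF, pvEndsF, hp1, hpa', hne, hnb, show a - 1 + 1 = a from by ring]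

lemma pvFold_pair (o1 o2 : List Int) (idxs : List Int) : ∀ s1 s2,
    idxs.foldl (fun (s : (Bool × Int × List (List Int)) × (Bool × Int × List (List Int))) i =>
        (pvStepA o1 s.1 i, pvStepA o2 s.2 i)) (s1, s2)
      = (pvFold o1 idxs s1, pvFold o2 idxs s2) := by
  induction idxs with
  | nil => intro s1 s2; simp [pvFold]
  | cons i rest ih =>
    intro s1 s2
    simp only [pvFold, List.foldl_cons]
    exact ih _ _

lemma pvRange_getLastD (a b : Int) (h : a < b) : (PySem.List.pyRange a b 1).getLastD 0 = b - 1 := by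
  have hb : b = (b - 1) + 1 := by ring
  rw [hb, PySem.List.pyRange_one_succ_right (by omega)]
  simp

lemma pvFoldl_congr {A B : Type} (f g : A → B → A) (h : ∀ a b, f a b = g a b) (l : List B) (a : A) :
    List.foldl f a l = List.foldl g a l := by
  have hfg : f = g := funext fun x => funext (h x)
  rw [hfg]

-- ===== VERDICT (by name: the statement is the Claim_ definition above) =====
theorem explain_sat_or_spec : Claim_equal_explain_sat_or := by
  intro o1 o2 ivs _ _
  unfold Spec_explain_sat_or explain_sat_or explain_sat_or_alt
  apply pvFoldl_congr
  intro acc iv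
  rcases iv with _ | ⟨b, _ | ⟨e, _ | ⟨x, t⟩⟩⟩ <;> try rfl
  have hp : pvPair? [b, e] = some (b, e) := rfl
  rw [hp]
  simp only []
  by_cases hbe : b ≤ e
  · rw [pvFold_pair]
    have h1 := ((pvFT o1 b e ((e + 1) - b).toNat b le_rfl rfl).1 (Or.inl rfl)) 0 acc.1
    have h2 := ((pvFT o2 b e ((e + 1) - b).toNat b le_rfl rfl).1 (Or.inl rfl)) 0 acc.2
    have hil : (PySem.List.pyRange b (e + 1) 1).getLastD 0 = e := by
      rw [pvRange_getLastD b (e + 1) (by omega)]; ring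
    simp only [pvFlush] at h1 h2
    rw [hil]
    exact Prod.ext h1 h2
  · rw [PySem.List.pyRange_one_eq_nil (by omega)]
    simp [pvRunsB, pvStartsF, pvEndsF, PySem.List.pyRange_one_eq_nil (by omega : e + 1 ≤ b)]
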